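-- pv_equiv track=rewrite | github.com/Vebjorhk/masters-thesis-VLN | notebooks/utils.py | sorting_for_curriculum_learning
-- ===== SOURCE A (Python) =====
-- from collections import defaultdict
--
-- def sorting_for_curriculum_learning(data):
--     grouped_data = defaultdict(list)
--
--     for sample in data:
--         grouped_data[sample["path_id"]].append(sample)
--
--     sorted_ids = sorted(grouped_data, key=lambda x: len(grouped_data[x]))
--
--     sorted_paths = []
--
--     for ix in sorted_ids:
--         for sample in grouped_data[ix]:
--             sorted_paths.append(sample)
--
--
--     return sorted_paths
-- ===== SOURCE B (Python) =====
-- def sorting_for_curriculum_learning(data):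
--     # One counting pass, then a single stable sort of the flat sample list:
--     # primary key = group size, secondary key = the group's first-appearance
--     # index (keeps equal-size groups contiguous, in order of first appearance);
--     # stability preserves the within-group order.
--     sizes = {}
--     first = {}
--     for i, sample in enumerate(data):
--         p = sample["path_id"]
--         sizes[p] = sizes.get(p, 0) + 1
--         first.setdefault(p, i)
--     return sorted(data, key=lambda s: (sizes[s["path_id"]], first[s["path_id"]]))
-- ===== Notes on version B (the rewrite author's own statement) =====
-- stated objective: alternative
-- what changed: B replaces A's group-into-dict-of-lists + sort of the group ids + concatenation with one counting pass (per-path_id group size and first-appearance index) followed by a single stable sort of the flat sample list under the tuple key (size, first-appearance index); Pre_ excludes only inputs where some sample lacks the 'path_id' key, on which A raises KeyError.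
import Mathlib
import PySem

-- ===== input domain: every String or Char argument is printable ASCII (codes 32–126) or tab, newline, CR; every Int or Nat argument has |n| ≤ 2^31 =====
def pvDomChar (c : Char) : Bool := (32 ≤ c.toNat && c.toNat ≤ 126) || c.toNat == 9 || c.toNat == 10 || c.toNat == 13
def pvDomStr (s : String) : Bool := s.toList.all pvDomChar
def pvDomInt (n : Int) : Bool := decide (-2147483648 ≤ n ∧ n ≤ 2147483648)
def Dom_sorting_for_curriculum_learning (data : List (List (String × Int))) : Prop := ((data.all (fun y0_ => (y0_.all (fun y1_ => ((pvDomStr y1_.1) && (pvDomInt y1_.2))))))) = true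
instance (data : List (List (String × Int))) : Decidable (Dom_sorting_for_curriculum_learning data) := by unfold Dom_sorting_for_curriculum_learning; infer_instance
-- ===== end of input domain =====

-- B: one counting pass (group size + first-appearance index per path_id), then a single
-- stable sort of the flat sample list under the tuple key (size, first index) — instead of
-- A's dict-of-lists grouping, sort of the ids by group size, and concatenation.


-- ===== PORT A =====
-- shared helper: sample["path_id"] (a dict lookup; the key is present on every input admitted by Pre_)
def pvPid (s : List (String × Int)) : Int :=
  ((PySem.Dict.mk s).get? "path_id").getD 0

def sorting_for_curriculum_learning (data : List (List (String × Int))) : List (List (String × Int)) :=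
  let grouped : PySem.Dict Int (List (List (String × Int))) :=
    data.foldl (fun d s => d.modify (pvPid s) [] (fun l => l ++ [s])) PySem.Dict.empty
  let sorted_ids := PySem.List.sorted grouped.keys (fun x => PySem.List.len (grouped.getD x []))
  sorted_ids.foldl (fun acc ix => (grouped.getD ix []).foldl (fun acc2 s => acc2 ++ [s]) acc) []

-- ===== PORT B =====
def sorting_for_curriculum_learning_alt (data : List (List (String × Int))) : List (List (String × Int)) :=
  let sf :=
    (PySem.List.enumerate data).foldl
      (fun (sf : PySem.Dict Int Int × PySem.Dict Int Int) t =>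
        (sf.1.insert (pvPid t.2) (sf.1.getD (pvPid t.2) 0 + 1),
         if sf.2.contains (pvPid t.2) then sf.2 else sf.2.insert (pvPid t.2) t.1))
      (PySem.Dict.empty, PySem.Dict.empty)
  PySem.List.sorted2 data (fun s => sf.1.getD (pvPid s) 0) (fun s => sf.2.getD (pvPid s) 0)

-- ===== PRECONDITION & SPEC =====
-- Pre_ excludes exactly the inputs on which some sample has no "path_id" key: there the Python A raises KeyError.
def Pre_sorting_for_curriculum_learning (data : List (List (String × Int))) : Prop :=
  ∀ s ∈ data, "path_id" ∈ s.map Prod.fst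
instance (data : List (List (String × Int))) : Decidable (Pre_sorting_for_curriculum_learning data) := by
  unfold Pre_sorting_for_curriculum_learning; infer_instance

def pvWitness_sorting_for_curriculum_learning : (List (List (String × Int))) :=
  [[("path_id", 2)], [("path_id", 1)], [("path_id", 2)]]

def Spec_sorting_for_curriculum_learning (data : List (List (String × Int))) (out : List (List (String × Int))) : Prop := out = sorting_for_curriculum_learning_alt data
instance (data : List (List (String × Int))) (out : List (List (String × Int))) : Decidable (Spec_sorting_for_curriculum_learning data out) := by unfold Spec_sorting_for_curriculum_learning; infer_instance

-- ===== CLAIM (what is proved, stated in full; the proofs are below) =====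
def Claim_equal_sorting_for_curriculum_learning : Prop := ∀ (data : List (List (String × Int))), Dom_sorting_for_curriculum_learning data → Pre_sorting_for_curriculum_learning data → Spec_sorting_for_curriculum_learning data (sorting_for_curriculum_learning data)

-- ===== LEMMAS AND PROOFS =====

-- insertBy only compares the inserted element with list members
theorem pvInsertBy_congr {α : Type} (b1 b2 : α → α → Bool) (x : α) (acc : List α)
    (h : ∀ y ∈ acc, b1 x y = b2 x y) :
    PySem.List.insertBy b1 x acc = PySem.List.insertBy b2 x acc := by
  induction acc with
  | nil => rfl
  | cons y ys ih =>
    simp only [PySem.List.insertBy]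
    rw [h y (by simp)]
    by_cases hb : b2 x y = true
    · simp [hb]
    · simp only [Bool.not_eq_true] at hb
      simp [hb]
      exact ih (fun z hz => h z (by simp [hz]))

-- two insertion sorts agree when the comparisons actually performed agree
theorem pvFoldl_insertBy_congr {α : Type} (b1 b2 : α → α → Bool) :
    ∀ (xs acc : List α), (∀ y ∈ acc, ∀ x ∈ xs, b1 x y = b2 x y) →
      List.Pairwise (fun y x => b1 x y = b2 x y) xs →
      xs.foldl (fun a x => PySem.List.insertBy b1 x a) acc
        = xs.foldl (fun a x => PySem.List.insertBy b2 x a) acc := by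
  intro xs
  induction xs with
  | nil => intro acc _ _; rfl
  | cons x rest ih =>
    intro acc hacc hp
    simp only [List.foldl_cons]
    rw [pvInsertBy_congr b1 b2 x acc (fun y hy => hacc y hy x (by simp))]
    apply ih
    · intro y hy z hz
      rcases (PySem.List.insertBy_mem_iff b2 x y acc).1 hy with rfl | hy'
      · exact (List.pairwise_cons.1 hp).1 z hz
      · exact hacc y hy' z (by simp [hz])
    · exact (List.pairwise_cons.1 hp).2

-- stable sort under a refined key: if the two keys compare identically on every
-- ordered pair of the input, the sorts coincide
theorem pvSorted_key_refine {α κ₁ κ₂ : Type} [LinearOrder κ₁] [LinearOrder κ₂]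
    (xs : List α) (k1 : α → κ₁) (k2 : α → κ₂)
    (hp : List.Pairwise (fun y x => (k1 x < k1 y ↔ k2 x < k2 y)) xs) :
    PySem.List.sorted xs k1 = PySem.List.sorted xs k2 := by
  rw [PySem.List.sorted_eq_foldl_insertBy, PySem.List.sorted_eq_foldl_insertBy]
  apply pvFoldl_insertBy_congr _ _ xs [] (by simp)
  exact hp.imp (fun h => by rw [decide_eq_decide]; exact h)

-- packing arithmetic
theorem pvPack_lt (a b t u n : Nat) (h : a < b) (ht : t < n) : a * n + t < b * n + u := by
  have h1 : (a + 1) * n ≤ b * n := Nat.mul_le_mul_right n h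
  have h2 : (a + 1) * n = a * n + n := by ring
  omega

theorem pvPack_iff (a b t u n : Nat) (ht : t < n) (hu : u < n) :
    a * n + t < b * n + u ↔ (a < b ∨ (a = b ∧ t < u)) := by
  constructor
  · intro h
    rcases Nat.lt_trichotomy a b with hab | hab | hab
    · exact Or.inl hab
    · subst hab; exact Or.inr ⟨rfl, by omega⟩
    · exact absurd (pvPack_lt b a u t n hab hu) (by omega)
  · rintro (h | ⟨rfl, h⟩)
    · exact pvPack_lt a b t u n h ht
    · omega

theorem pvPack_inj (a b t u n : Nat) (ht : t < n) (hu : u < n)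
    (h : a * n + t = b * n + u) : a = b ∧ t = u := by
  rcases Nat.lt_trichotomy a b with hab | hab | hab
  · exact absurd (pvPack_lt a b t u n hab ht) (by omega)
  · subst hab; omega
  · exact absurd (pvPack_lt b a u t n hab hu) (by omega)

-- the dedup (first-occurrence) list is strictly ordered by first index
theorem pvDedup_pairwise (l : List Int) :
    List.Pairwise (fun p q => ∃ i j, PySem.List.index? l p = some i ∧
      PySem.List.index? l q = some j ∧ i < j) (PySem.Set.ofList l) := by
  induction l using List.reverseRecOn with
  | nil => simp [PySem.Set.ofList]
  | append_singleton xs x ih =>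
    rw [PySem.Set.ofList_append_singleton]
    by_cases hx : x ∈ PySem.Set.ofList xs
    · rw [PySem.Set.add_of_mem hx]
      refine ih.imp_of_mem ?_
      intro a b ha hb hab
      obtain ⟨i, j, hi, hj, hij⟩ := hab
      have ha' : a ∈ xs := (PySem.Set.mem_ofList xs a).1 ha
      have hb' : b ∈ xs := (PySem.Set.mem_ofList xs b).1 hb
      exact ⟨i, j, by rw [PySem.List.index?_append_of_mem _ ha']; exact hi,
        by rw [PySem.List.index?_append_of_mem _ hb']; exact hj, hij⟩
    · have hx' : x ∉ xs := fun hc => hx ((PySem.Set.mem_ofList xs x).2 hc)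
      rw [PySem.Set.add_of_not_mem hx, List.pairwise_append]
      refine ⟨ih.imp_of_mem ?_, by simp, ?_⟩
      · intro a b ha hb hab
        obtain ⟨i, j, hi, hj, hij⟩ := hab
        have ha' : a ∈ xs := (PySem.Set.mem_ofList xs a).1 ha
        have hb' : b ∈ xs := (PySem.Set.mem_ofList xs b).1 hb
        exact ⟨i, j, by rw [PySem.List.index?_append_of_mem _ ha']; exact hi,
          by rw [PySem.List.index?_append_of_mem _ hb']; exact hj, hij⟩
      · intro a ha b hb
        simp only [List.mem_singleton] at hb
        rw [hb]
        have ha' : a ∈ xs := (PySem.Set.mem_ofList xs a).1 ha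
        have hsome : (PySem.List.index? xs a).isSome = true :=
          (PySem.List.index?_isSome_iff xs a).2 ha'
        obtain ⟨i, hi⟩ := Option.isSome_iff_exists.1 hsome
        obtain ⟨hk, -, -⟩ := PySem.List.getElem_of_index?_eq_some hi
        exact ⟨i, xs.length, by rw [PySem.List.index?_append_of_mem _ ha']; exact hi,
          PySem.List.index?_append_singleton_self xs x hx', hk⟩

-- a complete nodup list of bucket ids: concatenating the buckets permutes the list
theorem pvPartition_perm {β : Type} (g : β → Int) :
    ∀ (os : List Int) (l : List β), os.Nodup → (∀ x ∈ l, g x ∈ os) →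
      (os.flatMap (fun p => l.filter (fun x => g x == p))).Perm l := by
  intro os
  induction os with
  | nil =>
    intro l _ h
    cases l with
    | nil => simp
    | cons a t => exact absurd (h a (by simp)) (by simp)
  | cons p rest ih =>
    intro l hnd hmem
    simp only [List.flatMap_cons]
    have hrw : rest.flatMap (fun q => l.filter (fun x => g x == q))
        = rest.flatMap (fun q => (l.filter (fun x => !(g x == p))).filter (fun x => g x == q)) := by
      apply List.flatMap_congr
      intro q hq
      rw [List.filter_filter]
      apply List.filter_congr
      intro x _
      by_cases hxq : g x = q
      · have hqp : q ≠ p := by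
          intro hcon; subst hcon; exact (List.pairwise_cons.1 hnd).1 q hq rfl
        simp [hxq, hqp]
      · simp [hxq]
    rw [hrw]
    have hperm := ih (l.filter (fun x => !(g x == p))) hnd.of_cons ?_
    · exact (hperm.append_left _).trans (List.filter_append_perm _ l)
    · intro x hxmem
      have hx := List.of_mem_filter hxmem
      have hxl : x ∈ l := List.mem_filter.1 hxmem |>.1
      have := hmem x hxl
      simp only [List.mem_cons] at this
      rcases this with h1 | h1
      · simp [h1] at hx
      · exact h1

-- mapping the second component through an enumeration
theorem pvEnum_map {β γ : Type} (f : β → γ) :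
    ∀ (xs : List β) (s : Int), (PySem.List.enumerate xs s).map (fun t => f t.2) = xs.map f := by
  intro xs
  induction xs with
  | nil => intro s; simp [PySem.List.enumerate_nil]
  | cons x rest ih => intro s; simp [PySem.List.enumerate_cons, ih]

theorem pvEnum_filter_snd {β : Type} (q : β → Bool) :
    ∀ (xs : List β) (s : Int),
      ((PySem.List.enumerate xs s).filter (fun t => q t.2)).map (fun t => t.2) = xs.filter q := by
  intro xs
  induction xs with
  | nil => intro s; simp [PySem.List.enumerate_nil]
  | cons x rest ih =>
    intro s
    rw [PySem.List.enumerate_cons]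
    by_cases hq : q x = true
    · simp [hq, ih]
    · have hq' : q x = false := by simpa using hq
      simp [hq', ih]

-- the first-appearance dictionary loop
theorem pvFirst_get? :
    ∀ (xs : List (List (String × Int))) (s0 : Int) (d : PySem.Dict Int Int) (p : Int),
      ((PySem.List.enumerate xs s0).foldl
          (fun d t => if d.contains (pvPid t.2) then d else d.insert (pvPid t.2) t.1) d).get? p
        = (d.get? p).or ((PySem.List.index? (xs.map pvPid) p).map (fun k => s0 + (k : Int))) := by
  intro xs
  induction xs with
  | nil => intro s0 d p; simp [PySem.List.enumerate_nil, PySem.List.index?]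
  | cons x rest ih =>
    intro s0 d p
    rw [PySem.List.enumerate_cons]
    simp only [List.foldl_cons, List.map_cons]
    by_cases hpx : pvPid x = p
    · subst hpx
      rw [PySem.List.index?_cons_self]
      by_cases hc : d.contains (pvPid x) = true
      · simp only [hc, if_true]
        rw [ih]
        have : (d.get? (pvPid x)).isSome = true := by
          rw [← PySem.Dict.contains_eq_isSome_get?]; exact hc
        obtain ⟨v, hv⟩ := Option.isSome_iff_exists.1 this
        simp [hv]
      · have hcf : d.contains (pvPid x) = false := by simpa using hc
        rw [hcf]
        simp only [Bool.false_eq_true, if_false]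
        rw [ih]
        have hnone : d.get? (pvPid x) = none :=
          (PySem.Dict.get?_eq_none_iff_contains d (pvPid x)).2 hcf
        rw [PySem.Dict.get?_insert]
        simp [hnone]
    · rw [PySem.List.index?_cons_of_ne _ hpx]
      have hd' :
          (if d.contains (pvPid x) = true then d else d.insert (pvPid x) s0).get? p = d.get? p := by
        by_cases hc : d.contains (pvPid x) = true
        · simp [hc]
        · have hcf : d.contains (pvPid x) = false := by simpa using hc
          rw [hcf]
          simp only [Bool.false_eq_true, if_false]
          rw [PySem.Dict.get?_insert]
          rw [if_neg (fun h => hpx h.symm)]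
      rw [ih, hd']
      congr 1
      cases PySem.List.index? (List.map pvPid rest) p with
      | none => rfl
      | some k => simp; ring

-- counting samples of one path_id
theorem pvCount_filter (data : List (List (String × Int))) (x : Int) :
    (data.filter (fun s => pvPid s == x)).length = (data.map pvPid).count x := by
  rw [List.count_eq_countP, List.countP_map, List.countP_eq_length_filter]
  rfl

-- proof-side packed pid key: (group size, first-appearance index)
def pvKN (l : List Int) (p : Int) : Nat :=
  l.count p * l.length + (PySem.List.index? l p).getD 0

theorem pvFidx_lt (l : List Int) {p : Int} (hp : p ∈ l) :
    ∃ i, PySem.List.index? l p = some i ∧ i < l.length ∧ (PySem.List.index? l p).getD 0 = i := by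
  obtain ⟨i, hi⟩ := Option.isSome_iff_exists.1 ((PySem.List.index?_isSome_iff l p).2 hp)
  obtain ⟨hk, -, -⟩ := PySem.List.getElem_of_index?_eq_some hi
  exact ⟨i, hi, hk, by rw [hi]; rfl⟩

theorem pvIndex?_inj {l : List Int} {p q : Int} {i : Nat}
    (hp : PySem.List.index? l p = some i) (hq : PySem.List.index? l q = some i) : p = q := by
  obtain ⟨hk, hgp, -⟩ := PySem.List.getElem_of_index?_eq_some hp
  obtain ⟨hk', hgq, -⟩ := PySem.List.getElem_of_index?_eq_some hq
  rw [← hgp, ← hgq]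

-- A's stable sort of the ids by group size equals the sort by the packed key
theorem pvSorted_cnt_eq_kN (l : List Int) :
    PySem.List.sorted (PySem.Set.ofList l) (fun p => (l.count p : Int))
      = PySem.List.sorted (PySem.Set.ofList l) (pvKN l) := by
  apply pvSorted_key_refine
  refine (pvDedup_pairwise l).imp_of_mem ?_
  intro p q hp hq hpq
  obtain ⟨i, j, hi, hj, hij⟩ := hpq
  obtain ⟨hki, -, -⟩ := PySem.List.getElem_of_index?_eq_some hi
  obtain ⟨hkj, -, -⟩ := PySem.List.getElem_of_index?_eq_some hj
  constructor
  · intro h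
    unfold pvKN
    rw [hi, hj]
    simp only [Option.getD_some]
    exact (pvPack_iff (l.count q) (l.count p) j i l.length hkj hki).2 (Or.inl (by exact_mod_cast h))
  · intro h
    unfold pvKN at h
    rw [hi, hj] at h
    simp only [Option.getD_some] at h
    rcases (pvPack_iff (l.count q) (l.count p) j i l.length hkj hki).1 h with h' | ⟨-, h'⟩
    · exact_mod_cast h'
    · omega

theorem pvOrd_nodup (l : List Int) (key : Int → Nat) :
    (PySem.List.sorted (PySem.Set.ofList l) key).Nodup :=
  ((PySem.List.sorted_perm (PySem.Set.ofList l) key false).nodup_iff).2 (PySem.Set.nodup_ofList l)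

theorem pvOrd_strict (l : List Int) :
    (PySem.List.sorted (PySem.Set.ofList l) (pvKN l)).Pairwise
      (fun a b => pvKN l a < pvKN l b) := by
  have hs := PySem.List.sorted_pairwise (PySem.Set.ofList l) (pvKN l)
  have hnd : (PySem.List.sorted (PySem.Set.ofList l) (pvKN l)).Nodup := pvOrd_nodup l (pvKN l)
  refine (hs.and hnd).imp_of_mem ?_
  intro a b ha hb hab
  have ha' : a ∈ l := (PySem.Set.mem_ofList l a).1
    ((PySem.List.mem_sorted (PySem.Set.ofList l) (pvKN l) false a).1 ha)
  have hb' : b ∈ l := (PySem.Set.mem_ofList l b).1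
    ((PySem.List.mem_sorted (PySem.Set.ofList l) (pvKN l) false b).1 hb)
  obtain ⟨i, hi, hilt, hgi⟩ := pvFidx_lt l ha'
  obtain ⟨j, hj, hjlt, hgj⟩ := pvFidx_lt l hb'
  refine lt_of_le_of_ne hab.1 ?_
  intro heq
  unfold pvKN at heq
  rw [hgi, hgj] at heq
  obtain ⟨-, hij⟩ := pvPack_inj _ _ _ _ _ hilt hjlt heq
  subst hij
  exact hab.2 (pvIndex?_inj hi hj)

-- A computes: group ids in first-appearance order, stably sorted by group size,
-- each id replaced by the id's samples in order
theorem pvA_eq (data : List (List (String × Int))) :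
    sorting_for_curriculum_learning data
      = (PySem.List.sorted (PySem.Set.ofList (data.map pvPid))
          (fun p => ((data.map pvPid).count p : Int))).flatMap
          (fun p => data.filter (fun s => pvPid s == p)) := by
  unfold sorting_for_curriculum_learning
  dsimp only
  set G := data.foldl (fun d s => d.modify (pvPid s) [] (fun l => l ++ [s])) PySem.Dict.empty with hG
  have hGmap : G = (data.map (fun s => (pvPid s, s))).foldl
      (fun d p => d.modify p.1 [] (fun l => l ++ [p.2])) PySem.Dict.empty :=
    (List.foldl_map (f := fun s => (pvPid s, s))
      (g := fun d p => PySem.Dict.modify d p.1 [] (fun l => l ++ [p.2]))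
      (l := data) (init := PySem.Dict.empty)).symm
  have hgetD : ∀ c, G.getD c [] = data.filter (fun s => pvPid s == c) := by
    intro c
    rw [hGmap, PySem.Dict.getD_foldl_modify_append, PySem.Dict.getD_empty]
    rw [List.filter_map, List.map_map]
    simp [Function.comp_def]
  have hkeys : G.keys = PySem.Set.ofList (data.map pvPid) := by
    rw [hGmap, PySem.Dict.keys_foldl_modify_key, PySem.Dict.keys_empty,
      PySem.Set.update_nil_left, List.map_map]
    rfl
  have hlen : (fun x => PySem.List.len (G.getD x []))
      = (fun x => ((data.map pvPid).count x : Int)) := by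
    funext x
    rw [hgetD, PySem.List.len_eq, pvCount_filter]
  rw [hkeys, hlen]
  simp only [PySem.List.foldl_append_singleton_eq_self]
  rw [PySem.List.foldl_append_eq_flatMap, List.nil_append]
  exact List.flatMap_congr (fun p _ => hgetD p)

-- mapping snd through one insertion, when the comparisons coincide
theorem pvInsertBy_map_snd {α : Type} (b1 : α → α → Bool) (b2 : Int × α → Int × α → Bool)
    (x : Int × α) :
    ∀ (acc : List (Int × α)), (∀ y ∈ acc, b2 x y = b1 x.2 y.2) →
      (PySem.List.insertBy b2 x acc).map (fun t => t.2)
        = PySem.List.insertBy b1 x.2 (acc.map (fun t => t.2)) := by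
  intro acc
  induction acc with
  | nil => intro _; rfl
  | cons y ys ih =>
    intro h
    simp only [PySem.List.insertBy, List.map_cons]
    rw [h y (by simp)]
    by_cases hb : b1 x.2 y.2 = true
    · simp [hb]
    · have hb' : b1 x.2 y.2 = false := by simpa using hb
      simp only [hb', Bool.false_eq_true, if_false, List.map_cons]
      rw [ih (fun z hz => h z (by simp [hz]))]

-- STABILITY: the insertion sort of the enumerated list, under a comparison that agrees
-- with the plain comparison whenever the inserted element carries the larger index,
-- projects (snd) to the plain insertion sort
theorem pvStable {α : Type} (b1 : α → α → Bool) (b2 : Int × α → Int × α → Bool)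
    (Q : α → Prop)
    (h : ∀ (i j : Int) (x y : α), Q x → Q y → j < i → b2 (i, x) (j, y) = b1 x y) :
    ∀ (xs : List α) (s : Int) (acc2 : List (Int × α)),
      (∀ x ∈ xs, Q x) → (∀ t ∈ acc2, t.1 < s ∧ Q t.2) →
      ((PySem.List.enumerate xs s).foldl (fun acc t => PySem.List.insertBy b2 t acc) acc2).map
          (fun t => t.2)
        = xs.foldl (fun acc x => PySem.List.insertBy b1 x acc) (acc2.map (fun t => t.2)) := by
  intro xs
  induction xs with
  | nil => intro s acc2 _ _; simp [PySem.List.enumerate_nil]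
  | cons x rest ih =>
    intro s acc2 hQ hacc
    rw [PySem.List.enumerate_cons]
    simp only [List.foldl_cons]
    have hcmp : ∀ y ∈ acc2, b2 (s, x) y = b1 x y.2 := by
      intro y hy
      have := h s y.1 x y.2 (hQ x (by simp)) (hacc y hy).2 (hacc y hy).1
      simpa using this
    have hinv : ∀ t ∈ PySem.List.insertBy b2 (s, x) acc2, t.1 < s + 1 ∧ Q t.2 := by
      intro t ht
      rcases (PySem.List.insertBy_mem_iff b2 (s, x) t acc2).1 ht with rfl | ht'
      · exact ⟨by omega, hQ x (by simp)⟩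
      · exact ⟨by have := (hacc t ht').1; omega, (hacc t ht').2⟩
    rw [ih (s + 1) _ (fun z hz => hQ z (by simp [hz])) hinv,
      pvInsertBy_map_snd b1 b2 (s, x) acc2 hcmp]

-- the tuple-lex comparison (count, first index) coincides with the packed-Nat key order
theorem pvLex_pack (c1 c2 f1 f2 n : Nat) (h1 : f1 < n) (h2 : f2 < n) :
    c1 * n + f1 < c2 * n + f2 ↔ (c1 < c2 ∨ (c1 = c2 ∧ f1 < f2)) :=
  pvPack_iff c1 c2 f1 f2 n h1 h2

-- B computes: the samples, stably sorted by the tuple key, grouped exactly into A's blocks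
theorem pvB_eq (data : List (List (String × Int))) :
    sorting_for_curriculum_learning_alt data
      = (PySem.List.sorted (PySem.Set.ofList (data.map pvPid))
          (pvKN (data.map pvPid))).flatMap
          (fun p => data.filter (fun s => pvPid s == p)) := by
  unfold sorting_for_curriculum_learning_alt
  dsimp only
  set sf := (PySem.List.enumerate data 0).foldl
      (fun (sf : PySem.Dict Int Int × PySem.Dict Int Int) t =>
        (sf.1.insert (pvPid t.2) (sf.1.getD (pvPid t.2) 0 + 1),
         if sf.2.contains (pvPid t.2) then sf.2 else sf.2.insert (pvPid t.2) t.1))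
      (PySem.Dict.empty, PySem.Dict.empty) with hsfdef
  have hsf : sf = ((PySem.List.enumerate data 0).foldl
        (fun (d : PySem.Dict Int Int) t => d.insert (pvPid t.2) (d.getD (pvPid t.2) 0 + 1))
        PySem.Dict.empty,
      (PySem.List.enumerate data 0).foldl
        (fun (d : PySem.Dict Int Int) t =>
          if d.contains (pvPid t.2) then d else d.insert (pvPid t.2) t.1)
        PySem.Dict.empty) := by
    rw [hsfdef]
    exact PySem.List.foldl_prod_mk
      (f := fun (d : PySem.Dict Int Int) (t : Int × List (String × Int)) =>
        d.insert (pvPid t.2) (d.getD (pvPid t.2) 0 + 1))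
      (g := fun (d : PySem.Dict Int Int) (t : Int × List (String × Int)) =>
        if d.contains (pvPid t.2) then d else d.insert (pvPid t.2) t.1)
      (l := PySem.List.enumerate data 0) (a := PySem.Dict.empty) (b := PySem.Dict.empty)
  rw [hsf]
  -- the size dictionary holds the group sizes
  have hsizes : ∀ p, ((PySem.List.enumerate data 0).foldl
        (fun (d : PySem.Dict Int Int) t => d.insert (pvPid t.2) (d.getD (pvPid t.2) 0 + 1))
        PySem.Dict.empty).getD p 0 = ((data.map pvPid).count p : Int) := by
    intro p
    have hm : (PySem.List.enumerate data 0).foldl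
        (fun (d : PySem.Dict Int Int) t => d.insert (pvPid t.2) (d.getD (pvPid t.2) 0 + 1))
        PySem.Dict.empty
        = ((PySem.List.enumerate data 0).map (fun t => pvPid t.2)).foldl
            (fun (d : PySem.Dict Int Int) x => d.insert x (d.getD x 0 + 1)) PySem.Dict.empty :=
      (List.foldl_map (f := fun (t : Int × List (String × Int)) => pvPid t.2)
        (g := fun (d : PySem.Dict Int Int) x => d.insert x (d.getD x 0 + 1))
        (l := PySem.List.enumerate data 0) (init := PySem.Dict.empty)).symm
    rw [hm, pvEnum_map, PySem.Dict.getD_foldl_insert_add_one, PySem.Dict.getD_empty, zero_add]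
  -- the first dictionary holds the first-appearance indices
  have hfirst : ∀ p i, PySem.List.index? (data.map pvPid) p = some i →
      ((PySem.List.enumerate data 0).foldl
        (fun (d : PySem.Dict Int Int) t =>
          if d.contains (pvPid t.2) then d else d.insert (pvPid t.2) t.1)
        PySem.Dict.empty).getD p 0 = (i : Int) := by
    intro p i hi
    have hg := pvFirst_get? data 0 PySem.Dict.empty p
    rw [PySem.Dict.get?_empty, Option.none_or, hi] at hg
    simpa using PySem.Dict.getD_of_get?_eq_some _ 0 hg
  set L := data.map pvPid with hL
  -- B's sort is the enumerated sort under the packed key, projected to samples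
  have hstab : PySem.List.sorted2 data
        (fun s => ((PySem.List.enumerate data 0).foldl
          (fun (d : PySem.Dict Int Int) t => d.insert (pvPid t.2) (d.getD (pvPid t.2) 0 + 1))
          PySem.Dict.empty).getD (pvPid s) 0)
        (fun s => ((PySem.List.enumerate data 0).foldl
          (fun (d : PySem.Dict Int Int) t =>
            if d.contains (pvPid t.2) then d else d.insert (pvPid t.2) t.1)
          PySem.Dict.empty).getD (pvPid s) 0)
      = (PySem.List.sorted (PySem.List.enumerate data 0)
          (fun t => toLex ((pvKN L (pvPid t.2) : Nat), t.1))).map (fun t => t.2) := by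
    rw [PySem.List.sorted_eq_foldl_insertBy]
    have hQ : ∀ x ∈ data, pvPid x ∈ L := fun x hx => by
      rw [hL]; exact List.mem_map_of_mem hx
    rw [pvStable
      (b1 := fun a b =>
        decide (((PySem.List.enumerate data 0).foldl
          (fun (d : PySem.Dict Int Int) t => d.insert (pvPid t.2) (d.getD (pvPid t.2) 0 + 1))
          PySem.Dict.empty).getD (pvPid a) 0
          < ((PySem.List.enumerate data 0).foldl
          (fun (d : PySem.Dict Int Int) t => d.insert (pvPid t.2) (d.getD (pvPid t.2) 0 + 1))
          PySem.Dict.empty).getD (pvPid b) 0)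
        || !decide (((PySem.List.enumerate data 0).foldl
          (fun (d : PySem.Dict Int Int) t => d.insert (pvPid t.2) (d.getD (pvPid t.2) 0 + 1))
          PySem.Dict.empty).getD (pvPid b) 0
          < ((PySem.List.enumerate data 0).foldl
          (fun (d : PySem.Dict Int Int) t => d.insert (pvPid t.2) (d.getD (pvPid t.2) 0 + 1))
          PySem.Dict.empty).getD (pvPid a) 0)
          && decide (((PySem.List.enumerate data 0).foldl
          (fun (d : PySem.Dict Int Int) t =>
            if d.contains (pvPid t.2) then d else d.insert (pvPid t.2) t.1)
          PySem.Dict.empty).getD (pvPid a) 0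
          < ((PySem.List.enumerate data 0).foldl
          (fun (d : PySem.Dict Int Int) t =>
            if d.contains (pvPid t.2) then d else d.insert (pvPid t.2) t.1)
          PySem.Dict.empty).getD (pvPid b) 0))
      (b2 := fun a b => decide (toLex ((pvKN L (pvPid a.2) : Nat), a.1)
        < toLex ((pvKN L (pvPid b.2) : Nat), b.1)))
      (Q := fun x => pvPid x ∈ L)
      ?_ data 0 [] hQ (by simp)]
    · rfl
    · intro i j x y hQx hQy hji
      obtain ⟨fx, hfx, hfxlt, -⟩ := pvFidx_lt L hQx
      obtain ⟨fy, hfy, hfylt, -⟩ := pvFidx_lt L hQy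
      simp only [hsizes, hfirst _ _ hfx, hfirst _ _ hfy]
      have hkx : pvKN L (pvPid x) = L.count (pvPid x) * L.length + fx := by
        unfold pvKN; rw [hfx]; rfl
      have hky : pvKN L (pvPid y) = L.count (pvPid y) * L.length + fy := by
        unfold pvKN; rw [hfy]; rfl
      have hlex : toLex ((pvKN L (pvPid x) : Nat), i) < toLex ((pvKN L (pvPid y) : Nat), j)
          ↔ pvKN L (pvPid x) < pvKN L (pvPid y) := by
        rw [Prod.Lex.lt_iff]
        simp only [ofLex_toLex]
        constructor
        · rintro (hlt | ⟨-, hij⟩)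
          · exact hlt
          · omega
        · exact Or.inl
      rw [show (decide (toLex ((pvKN L (pvPid x) : Nat), i) < toLex ((pvKN L (pvPid y) : Nat), j)))
          = decide (pvKN L (pvPid x) < pvKN L (pvPid y)) from by rw [decide_eq_decide]; exact hlex]
      rw [hkx, hky, ← decide_not, ← Bool.decide_and, ← Bool.decide_or, decide_eq_decide,
        pvLex_pack _ _ _ _ _ hfxlt hfylt]
      constructor
      · rintro (hc | ⟨hc, hf⟩)
        · exact Or.inl (by exact_mod_cast hc)
        · exact Or.inr ⟨by omega, by exact_mod_cast hf⟩
      · rintro (hc | ⟨hc, hf⟩)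
        · exact Or.inl (by exact_mod_cast hc)
        · have hle : L.count (pvPid x) ≤ L.count (pvPid y) := by
            have h2 : ¬ ((L.count (pvPid y) : Int) < (L.count (pvPid x) : Int)) := hc
            exact_mod_cast not_lt.1 h2
          rcases lt_or_eq_of_le hle with h' | h'
          · exact Or.inl h'
          · exact Or.inr ⟨h', by exact_mod_cast hf⟩
  rw [hstab]
  -- the enumerated lex sort is exactly A's grouped arrangement
  have hsorted : PySem.List.sorted (PySem.List.enumerate data 0)
      (fun t => toLex ((pvKN L (pvPid t.2) : Nat), t.1))
      = (PySem.List.sorted (PySem.Set.ofList L) (pvKN L)).flatMap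
          (fun p => (PySem.List.enumerate data 0).filter (fun t => pvPid t.2 == p)) := by
    apply PySem.List.sorted_eq_of_perm_of_pairwise_lt
    · exact pvPartition_perm (fun (t : Int × List (String × Int)) => pvPid t.2) _ _
        (pvOrd_nodup L (pvKN L))
        (fun t ht => by
          obtain ⟨k, hk, rfl⟩ := (PySem.List.mem_enumerate_iff data 0 t).1 ht
          exact (PySem.List.mem_sorted _ _ false _).2
            ((PySem.Set.mem_ofList _ _).2 (List.mem_map_of_mem (data.getElem_mem hk))))
    · rw [List.pairwise_flatMap]
      constructor
      · intro p hp
        refine ((PySem.List.pairwise_lt_enumerate data 0).filter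
          (fun (t : Int × List (String × Int)) => pvPid t.2 == p)).imp_of_mem ?_
        intro a b ha hb hlt
        have hap : pvPid a.2 = p := by simpa using (List.mem_filter.1 ha).2
        have hbp : pvPid b.2 = p := by simpa using (List.mem_filter.1 hb).2
        rw [Prod.Lex.lt_iff]
        simp only [ofLex_toLex]
        exact Or.inr ⟨by rw [hap, hbp], hlt⟩
      · refine (pvOrd_strict L).imp ?_
        intro p q h x hx y hy
        have hxp : pvPid x.2 = p := by simpa using (List.mem_filter.1 hx).2
        have hyq : pvPid y.2 = q := by simpa using (List.mem_filter.1 hy).2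
        rw [Prod.Lex.lt_iff]
        simp only [ofLex_toLex]
        exact Or.inl (by rw [hxp, hyq]; exact h)
  rw [hsorted, List.map_flatMap]
  exact List.flatMap_congr (fun p _ => pvEnum_filter_snd (fun s => pvPid s == p) data 0)

-- ===== VERDICT =====
theorem sorting_for_curriculum_learning_spec : Claim_equal_sorting_for_curriculum_learning := by
  intro data _hDom _hPre
  unfold Spec_sorting_for_curriculum_learning
  rw [pvA_eq, pvB_eq, pvSorted_cnt_eq_kN]
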